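-- pv_equiv track=rewrite | github.com/vinhyard/Code-Summarization | backend/github_oauth.py | extract_overview_snippet
-- ===== SOURCE A (Python) =====
-- def extract_overview_snippet(filecontent: str, max_lines=20, max_chars=1200):
--     """
--         This will extract the overview snippet from the file,
--         we can use this to get the most important lines of the file,
--         basically reducing the bigger files into just important sections
--         enough that the llm should be able to pull context itself.
--     """
--     important_lines = []
--     fallback_lines = []
--
--     for line in filecontent.splitlines():
--         #remove whitespace
--         stripped = line.strip()
--         if not stripped:
--             continue
--
--         #shorten the line to a max of 180 characters
--         shortened = stripped[:180]
--         #check if we're past the max lines, if not add it to fallback lines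
--         if len(fallback_lines) < max_lines:
--             fallback_lines.append(shortened)
--
--         # checks the line for keywords, things like if its a class identifier,
--         # function etc, since we can usually derive the function use from
--         # the name we mark these as important lines.
--         if stripped.startswith((
--             '#', '//', '/*', '*', 'import ', 'from ', 'export ',
--             'class ', 'def ', 'function ', 'interface ', 'type ',
--             'enum ', 'package ', 'module ', '@'
--         )):
--             important_lines.append(shortened)
--
--         #if we've hit the max lines, break
--         if len(important_lines) >= max_lines:
--             break
--
--     # if we have less than 4 important lines, use the fallback lines
--     # this is to ensure we have enough lines to make a good overview
--     # and keep in mind the fall-back lines already include the important ones.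
--     selected_lines = important_lines if len(important_lines) >= 4 else fallback_lines
--     return "\n".join(selected_lines)[:max_chars]
-- ===== SOURCE B (Python) =====
-- PREFIXES = (
--     '#', '//', '/*', '*', 'import ', 'from ', 'export ',
--     'class ', 'def ', 'function ', 'interface ', 'type ',
--     'enum ', 'package ', 'module ', '@'
-- )
--
-- def extract_overview_snippet(filecontent: str, max_lines=20, max_chars=1200):
--     lines = filecontent.splitlines()
--     # pass 1: count keyword lines to DECIDE the mode up front
--     kw_count = 0
--     for ln in lines:
--         s = ln.strip()
--         if s and s.startswith(PREFIXES):
--             kw_count += 1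
--     keywords_only = min(kw_count, max_lines) >= 4
--     # pass 2: emit lines of the chosen kind only, stopping at the line budget
--     out = []
--     for ln in lines:
--         if len(out) >= max_lines:
--             break
--         s = ln.strip()
--         if s and (not keywords_only or s.startswith(PREFIXES)):
--             out.append(s[:180])
--     return "\n".join(out)[:max_chars]
-- ===== Notes on version B (the rewrite author's own statement) =====
-- stated objective: alternative
-- what changed: A interleaves one loop that grows both candidate lists simultaneously and breaks early; B never builds both lists: a first counting pass decides the mode (keyword lines vs all lines) up front, then a single emit pass collects only lines of the chosen kind up to the line budget.
import Mathlib
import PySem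

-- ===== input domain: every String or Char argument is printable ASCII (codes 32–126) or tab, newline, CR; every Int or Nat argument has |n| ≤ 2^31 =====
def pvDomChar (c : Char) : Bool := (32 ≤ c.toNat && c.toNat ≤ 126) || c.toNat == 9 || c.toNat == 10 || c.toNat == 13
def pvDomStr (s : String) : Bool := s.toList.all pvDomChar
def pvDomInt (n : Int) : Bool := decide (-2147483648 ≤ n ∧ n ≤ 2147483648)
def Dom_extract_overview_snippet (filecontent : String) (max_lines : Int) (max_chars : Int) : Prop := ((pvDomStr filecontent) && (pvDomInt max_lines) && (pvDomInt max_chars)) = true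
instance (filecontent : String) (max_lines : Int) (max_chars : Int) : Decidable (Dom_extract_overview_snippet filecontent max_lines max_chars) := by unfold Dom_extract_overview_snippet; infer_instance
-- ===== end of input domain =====

-- B replaces A's single interleaved loop with two simultaneous accumulators and an early break
-- by decide-then-emit: a counting pass chooses the mode, then one emit pass collects only the
-- chosen kind of line (objective: alternative decomposition; no speed claim).

-- ===== PORT A =====
-- Python's stripped.startswith((...16 prefixes...)) — any of the tuple matches
def pvMatch (s : String) : Bool :=
  PySem.Str.startswith s "#" || PySem.Str.startswith s "//" || PySem.Str.startswith s "/*" ||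
  PySem.Str.startswith s "*" || PySem.Str.startswith s "import " || PySem.Str.startswith s "from " ||
  PySem.Str.startswith s "export " || PySem.Str.startswith s "class " || PySem.Str.startswith s "def " ||
  PySem.Str.startswith s "function " || PySem.Str.startswith s "interface " || PySem.Str.startswith s "type " ||
  PySem.Str.startswith s "enum " || PySem.Str.startswith s "package " || PySem.Str.startswith s "module " ||
  PySem.Str.startswith s "@"

-- A's for-loop with its break, state = (important_lines, fallback_lines)
def pvLoopA (max_lines : Int) : List String → List String → List String → List String × List String
  | [], imp, fb => (imp, fb)
  | line :: rest, imp, fb =>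
    let stripped := PySem.Str.strip line
    if stripped = "" then pvLoopA max_lines rest imp fb
    else
      let shortened := PySem.Str.slice stripped none (some 180)
      let fb' := if PySem.List.len fb < max_lines then fb ++ [shortened] else fb
      let imp' := if pvMatch stripped then imp ++ [shortened] else imp
      if max_lines ≤ PySem.List.len imp' then (imp', fb') else pvLoopA max_lines rest imp' fb'

def extract_overview_snippet (filecontent : String) (max_lines : Int) (max_chars : Int) : String :=
  let r := pvLoopA max_lines (PySem.Str.splitlines filecontent) [] []
  let selected := if 4 ≤ PySem.List.len r.1 then r.1 else r.2
  PySem.Str.slice (PySem.Str.join "\n" selected) none (some max_chars)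

-- ===== PORT B =====
-- B's pass 1: kw_count += 1 for each stripped non-empty keyword line
def pvCountKw : List String → Int
  | [] => 0
  | ln :: rest =>
    let s := PySem.Str.strip ln
    if s = "" then pvCountKw rest
    else if pvMatch s then pvCountKw rest + 1 else pvCountKw rest

-- B's pass 2: emit lines of the chosen kind, stopping at the line budget
def pvEmit (max_lines : Int) (kwOnly : Bool) : List String → List String → List String
  | [], out => out
  | ln :: rest, out =>
    if max_lines ≤ PySem.List.len out then out
    else
      let s := PySem.Str.strip ln
      if s = "" then pvEmit max_lines kwOnly rest out
      else if !kwOnly || pvMatch s then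
        pvEmit max_lines kwOnly rest (out ++ [PySem.Str.slice s none (some 180)])
      else pvEmit max_lines kwOnly rest out

def extract_overview_snippet_alt (filecontent : String) (max_lines : Int) (max_chars : Int) : String :=
  let lines := PySem.Str.splitlines filecontent
  let kwOnly := decide (4 ≤ min (pvCountKw lines) max_lines)
  PySem.Str.slice (PySem.Str.join "\n" (pvEmit max_lines kwOnly lines [])) none (some max_chars)

-- ===== PRECONDITION & SPEC =====
def Spec_extract_overview_snippet (filecontent : String) (max_lines : Int) (max_chars : Int) (out : String) : Prop := out = extract_overview_snippet_alt filecontent max_lines max_chars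
instance (filecontent : String) (max_lines : Int) (max_chars : Int) (out : String) : Decidable (Spec_extract_overview_snippet filecontent max_lines max_chars out) := by unfold Spec_extract_overview_snippet; infer_instance

-- ===== CLAIM (what is proved, stated in full; the proofs are below) =====
def Claim_equal_extract_overview_snippet : Prop := ∀ (filecontent : String) (max_lines : Int) (max_chars : Int), Dom_extract_overview_snippet filecontent max_lines max_chars → Spec_extract_overview_snippet filecontent max_lines max_chars (extract_overview_snippet filecontent max_lines max_chars)

-- ===== LEMMAS AND PROOFS =====

-- proof-only helper: the cleaned line (stripped, truncated) if non-empty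
def pvCleanLine (line : String) : Option String :=
  let s := PySem.Str.strip line
  if s = "" then none else some (PySem.Str.slice s none (some 180))

-- a startswith test with a prefix of length ≤ 180 is unaffected by the [:180] truncation
lemma pvStartswith_take (l p : List Char) (h : p.length ≤ 180) :
    PySem.Chars.startswith (l.take 180) p = PySem.Chars.startswith l p := by
  by_cases hp : p <+: l
  · rw [(PySem.Chars.startswith_iff _ _).mpr (List.prefix_take_iff.mpr ⟨hp, h⟩),
        (PySem.Chars.startswith_iff _ _).mpr hp]
  · have h1 : ¬ p <+: l.take 180 := fun hc => hp (hc.trans (List.take_prefix _ _))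
    rw [Bool.eq_iff_iff, PySem.Chars.startswith_iff, PySem.Chars.startswith_iff]
    exact iff_of_false h1 hp

-- the keyword test gives the same answer on the truncated line as on the stripped line
lemma pvMatch_slice (s : String) :
    pvMatch (PySem.Str.slice s none (some 180)) = pvMatch s := by
  unfold pvMatch
  simp only [PySem.Str.startswith_eq, PySem.Str.toList_slice, PySem.Chars.slice_eq_listSlice]
  rw [show ((180 : Int) = ((180 : Nat) : Int)) by norm_num, PySem.List.slice_to_natCast]
  repeat rw [pvStartswith_take _ _ (by decide)]

-- characterisation of A's loop for a positive line budget
lemma pvLoopA_spec (ml : Int) (hml : 0 < ml) :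
    ∀ (lines imp fb : List String),
      (imp.length : Int) < ml → imp.length ≤ fb.length → (fb.length : Int) ≤ ml →
      pvLoopA ml lines imp fb =
        (imp ++ ((lines.filterMap pvCleanLine).filter pvMatch).take (ml.toNat - imp.length),
         fb ++ (lines.filterMap pvCleanLine).take (ml.toNat - fb.length)) := by
  intro lines
  induction lines with
  | nil => intro imp fb _ _ _; simp [pvLoopA]
  | cons line rest ih =>
    intro imp fb h1 h2 h3
    by_cases hs : PySem.Str.strip line = ""
    · simp only [pvLoopA, hs, ite_true, List.filterMap_cons, pvCleanLine]
      exact ih imp fb h1 h2 h3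
    · have hclean : pvCleanLine line = some (PySem.Str.slice (PySem.Str.strip line) none (some 180)) := by
        simp [pvCleanLine, hs]
      simp only [pvLoopA, if_neg hs, List.filterMap_cons, hclean]
      set sh := PySem.Str.slice (PySem.Str.strip line) none (some 180) with hsh
      have hmatch : pvMatch sh = pvMatch (PySem.Str.strip line) := pvMatch_slice _
      have hlen : ∀ (xs : List String), PySem.List.len xs = (xs.length : Int) := by
        intro xs; simp [PySem.List.len_eq]
      by_cases hm : pvMatch (PySem.Str.strip line) = true
      · -- matching line
        simp only [hm, List.filter_cons, hmatch, hlen, ite_true]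
        by_cases hb : ml ≤ ((imp ++ [sh]).length : Int)
        · -- break: important is full
          have himp : imp.length + 1 = ml.toNat := by
            simp only [List.length_append, List.length_cons, List.length_nil] at hb
            omega
          simp only [if_pos hb]
          have hfb : fb.length = ml.toNat - 1 ∨ fb.length = ml.toNat := by omega
          have e1 : ml.toNat - imp.length = 1 := by omega
          rcases hfb with hfb | hfb
          · have hlt : (fb.length : Int) < ml := by omega
            have e2 : ml.toNat - fb.length = 1 := by omega
            simp [e1, e2, if_pos hlt]
          · have hnlt : ¬ ((fb.length : Int) < ml) := by omega
            have e2 : ml.toNat - fb.length = 0 := by omega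
            simp [e1, e2, if_neg hnlt]
        · -- continue with imp ++ [sh]
          simp only [if_neg hb]
          have h1' : ((imp ++ [sh]).length : Int) < ml := by
            simp only [List.length_append, List.length_cons, List.length_nil]
            simpa using lt_of_not_ge hb
          by_cases hf : (fb.length : Int) < ml
          · rw [if_pos hf,
                ih (imp ++ [sh]) (fb ++ [sh]) h1' (by simp only [List.length_append, List.length_cons, List.length_nil]; omega) (by simp only [List.length_append, List.length_cons, List.length_nil]; omega)]
            have e1 : ml.toNat - imp.length = (ml.toNat - (imp ++ [sh]).length) + 1 := by
              simp only [List.length_append, List.length_cons, List.length_nil] at h1' ⊢; omega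
            have e2 : ml.toNat - fb.length = (ml.toNat - (fb ++ [sh]).length) + 1 := by
              simp only [List.length_append, List.length_cons, List.length_nil]; omega
            simp [e1, e2, List.take_succ_cons]
          · rw [if_neg hf,
                ih (imp ++ [sh]) fb h1' (by simp only [List.length_append, List.length_cons, List.length_nil]; omega) h3]
            have e1 : ml.toNat - imp.length = (ml.toNat - (imp ++ [sh]).length) + 1 := by
              simp only [List.length_append, List.length_cons, List.length_nil] at h1' ⊢; omega
            have e2 : ml.toNat - fb.length = 0 := by omega
            simp [e1, e2, List.take_succ_cons]
      · -- non-matching line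
        have hm' : pvMatch (PySem.Str.strip line) = false := eq_false_of_ne_true hm
        rw [if_neg hm]
        have hnb : ¬ (ml ≤ PySem.List.len imp) := by rw [hlen]; omega
        rw [if_neg hnb, List.filter_cons, hmatch, hm']
        simp only [Bool.false_eq_true, if_neg (fun h : False => h), hlen]
        by_cases hf : ((fb.length : Int)) < ml
        · rw [if_pos hf, ih imp (fb ++ [sh]) h1 (by simp only [List.length_append, List.length_cons, List.length_nil]; omega) (by simp only [List.length_append, List.length_cons, List.length_nil]; omega)]
          have e2 : ml.toNat - fb.length = (ml.toNat - (fb ++ [sh]).length) + 1 := by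
            simp only [List.length_append, List.length_cons, List.length_nil]; omega
          simp [e2, List.take_succ_cons]
        · rw [if_neg hf, ih imp fb h1 h2 h3]
          have e2 : ml.toNat - fb.length = 0 := by omega
          simp [e2]

-- degenerate budget ml ≤ 0: A's loop fills no fallback line and at most one important line
lemma pvLoopA_nonpos (ml : Int) (hml : ml ≤ 0) (lines : List String) :
    (pvLoopA ml lines [] []).2 = [] ∧ (pvLoopA ml lines [] []).1.length ≤ 1 := by
  induction lines with
  | nil => simp [pvLoopA]
  | cons line rest ih =>
    by_cases hs : PySem.Str.strip line = ""
    · simpa [pvLoopA, hs] using ih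
    · by_cases hm : pvMatch (PySem.Str.strip line) = true
      · simp [pvLoopA, hs, hm, PySem.List.len_eq, hml, show ml ≤ (1:Int) by omega]
      · simp [pvLoopA, hs, hm, PySem.List.len_eq, hml]

-- B's counting pass counts the keyword lines among the cleaned lines
lemma pvCountKw_spec (lines : List String) :
    pvCountKw lines = (((lines.filterMap pvCleanLine).filter pvMatch).length : Int) := by
  induction lines with
  | nil => simp [pvCountKw]
  | cons line rest ih =>
    by_cases hs : PySem.Str.strip line = ""
    · simp [pvCountKw, hs, pvCleanLine, ih]
    · have hclean : pvCleanLine line = some (PySem.Str.slice (PySem.Str.strip line) none (some 180)) := by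
        simp [pvCleanLine, hs]
      by_cases hm : pvMatch (PySem.Str.strip line) = true
      · simp [pvCountKw, hs, hclean, pvMatch_slice, hm, ih]
      · simp [pvCountKw, hs, hclean, pvMatch_slice, hm, ih]

-- B's emit pass yields the first (ml - |out|) cleaned lines of the chosen kind
lemma pvEmit_spec (ml : Int) (b : Bool) :
    ∀ (lines out : List String), (out.length : Int) ≤ ml →
      pvEmit ml b lines out =
        out ++ ((lines.filterMap pvCleanLine).filter (fun s => !b || pvMatch s)).take (ml.toNat - out.length) := by
  intro lines
  induction lines with
  | nil => intro out _; simp [pvEmit]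
  | cons line rest ih =>
    intro out hout
    by_cases hfull : ml ≤ (out.length : Int)
    · have hlen : out.length = ml.toNat := by omega
      simp [pvEmit, PySem.List.len_eq, hlen]
    · have hnb : ¬ (ml ≤ PySem.List.len out) := by simp [PySem.List.len_eq]; omega
      by_cases hs : PySem.Str.strip line = ""
      · simp only [pvEmit, if_neg hnb, hs, ite_true, List.filterMap_cons, pvCleanLine]
        exact ih out hout
      · have hclean : pvCleanLine line = some (PySem.Str.slice (PySem.Str.strip line) none (some 180)) := by
          simp [pvCleanLine, hs]
        simp only [pvEmit, if_neg hnb, if_neg hs, List.filterMap_cons, hclean]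
        set sh := PySem.Str.slice (PySem.Str.strip line) none (some 180) with hsh
        by_cases hp : (!b || pvMatch (PySem.Str.strip line)) = true
        · have hp' : (!b || pvMatch sh) = true := by rw [hsh, pvMatch_slice]; exact hp
          rw [if_pos hp, ih (out ++ [sh]) (by simp only [List.length_append, List.length_cons, List.length_nil]; omega)]
          have e : ml.toNat - out.length = (ml.toNat - (out ++ [sh]).length) + 1 := by
            simp only [List.length_append, List.length_cons, List.length_nil]; omega
          simp [hp', e, List.take_succ_cons]
        · have hp' : ¬ ((!b || pvMatch sh) = true) := by rw [hsh, pvMatch_slice]; exact hp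
          rw [if_neg hp, ih out hout]
          simp [Bool.eq_false_iff.mpr hp']

-- emit with a non-positive budget produces nothing
lemma pvEmit_nonpos (ml : Int) (hml : ml ≤ 0) (b : Bool) (lines : List String) :
    pvEmit ml b lines [] = [] := by
  cases lines with
  | nil => simp [pvEmit]
  | cons line rest =>
    simp [pvEmit, PySem.List.len_eq, hml]

-- ===== VERDICT (by name: the statement is the Claim_ definition above) =====
theorem extract_overview_snippet_spec : Claim_equal_extract_overview_snippet := by
  intro fc ml mc _
  unfold Spec_extract_overview_snippet extract_overview_snippet extract_overview_snippet_alt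
  set lines := PySem.Str.splitlines fc with hls
  by_cases hml : 0 < ml
  · have hA := pvLoopA_spec ml hml lines [] [] (by simp; omega) (by simp) (by simp; omega)
    simp only [List.nil_append, List.length_nil, Nat.sub_zero] at hA
    have hB := pvEmit_spec ml (decide (4 ≤ min (pvCountKw lines) ml)) lines [] (by simp; omega)
    simp only [List.nil_append, List.length_nil, Nat.sub_zero] at hB
    have hk := pvCountKw_spec lines
    set clean := lines.filterMap pvCleanLine with hc
    have hsel : (4 ≤ PySem.List.len ((clean.filter pvMatch).take ml.toNat)) ↔
        (4 ≤ min (pvCountKw lines) ml) := by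
      rw [hk, PySem.List.len_eq]
      simp only [List.length_take]
      omega
    by_cases hkw : 4 ≤ min (pvCountKw lines) ml
    · have ht : decide (4 ≤ min (pvCountKw lines) ml) = true := decide_eq_true hkw
      have hft : clean.filter (fun s => !(decide (4 ≤ min (pvCountKw lines) ml)) || pvMatch s)
          = clean.filter pvMatch := by
        simp only [ht, Bool.not_true, Bool.false_or]
      simp only [hA, hB, hft, if_pos (hsel.mpr hkw)]
    · have ht : decide (4 ≤ min (pvCountKw lines) ml) = false := decide_eq_false hkw
      have hft : clean.filter (fun s => !(decide (4 ≤ min (pvCountKw lines) ml)) || pvMatch s)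
          = clean := by
        simp only [ht, Bool.not_false, Bool.true_or, List.filter_true]
      simp only [hA, hB, hft, if_neg (fun h => hkw (hsel.mp h))]
  · have hml' : ml ≤ 0 := by omega
    obtain ⟨hfb, himp⟩ := pvLoopA_nonpos ml hml' lines
    have h4' : ¬ (4 ≤ PySem.List.len (pvLoopA ml lines [] []).1) := by
      simp only [PySem.List.len_eq]; omega
    simp only [pvEmit_nonpos ml hml', if_neg h4', hfb]
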